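-- pv_equiv track=rewrite | github.com/jie-meng/mythril-agent-skills | scripts/validate-skill-descriptions.py | _fold_block
-- ===== SOURCE A (Python) =====
-- def _fold_block(style: str, lines: list[str]) -> str:
--     """Fold YAML block scalars for description value."""
--     if style == "|":
--         return "\n".join(lines).rstrip("\n")
--     if style == ">":
--         output: list[str] = []
--         paragraph: list[str] = []
--         for line in lines:
--             if line.strip() == "":
--                 if paragraph:
--                     output.append(" ".join(paragraph).strip())
--                     paragraph = []
--                 output.append("")
--             else:
--                 paragraph.append(line.strip())
--         if paragraph:
--             output.append(" ".join(paragraph).strip())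
--         return "\n".join(output).rstrip("\n")
--     return "\n".join(lines).rstrip("\n")
-- ===== SOURCE B (Python) =====
-- def _fold_block(style: str, lines: list[str]) -> str:
--     """Fold YAML block scalars for description value."""
--     if style == ">":
--         return "\n".join(_entries(lines)).rstrip("\n")
--     return "\n".join(lines).rstrip("\n")
--
--
-- def _entries(lines):
--     """Each blank line becomes one "" entry; each maximal run of
--     non-blank lines becomes one space-joined entry."""
--     if not lines:
--         return []
--     if lines[0].strip() == "":
--         return [""] + _entries(lines[1:])
--     k = 1
--     while k < len(lines) and lines[k].strip() != "":
--         k += 1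
--     return [" ".join(l.strip() for l in lines[:k]).strip()] + _entries(lines[k:])
-- ===== Notes on version B (the rewrite author's own statement) =====
-- stated objective: alternative
-- what changed: Replaces the stateful paragraph-accumulator loop of the '>' branch by a recursive run-splitter: each blank line yields one empty entry and each maximal run of non-blank lines is sliced off and space-joined in one step, with no paragraph state carried across iterations.
import Mathlib
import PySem

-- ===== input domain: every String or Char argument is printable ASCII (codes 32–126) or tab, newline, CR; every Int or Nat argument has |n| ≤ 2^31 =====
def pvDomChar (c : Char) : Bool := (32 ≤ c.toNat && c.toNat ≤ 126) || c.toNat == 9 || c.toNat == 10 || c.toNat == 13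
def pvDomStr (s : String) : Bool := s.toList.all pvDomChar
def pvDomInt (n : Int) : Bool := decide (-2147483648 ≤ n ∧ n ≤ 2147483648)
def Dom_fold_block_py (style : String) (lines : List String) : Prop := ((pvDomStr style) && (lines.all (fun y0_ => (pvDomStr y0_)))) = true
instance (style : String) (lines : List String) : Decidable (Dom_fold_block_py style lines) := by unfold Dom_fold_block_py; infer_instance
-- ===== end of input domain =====

-- B replaces A's stateful paragraph accumulator with a recursive run-splitter (alternative decomposition, same cost).

-- hand port of str.rstrip("\n") (drop only trailing newline chars); exact for all strings
def pvRstripNl (s : String) : String :=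
  String.ofList ((s.toList.reverse.dropWhile (fun c => c == '\n')).reverse)

-- ===== PORT A =====
-- one iteration of A's for-loop over (output, paragraph)
def pvStepA (acc : List String × List String) (line : String) : List String × List String :=
  if PySem.Str.strip line = "" then
    ((if acc.2 ≠ [] then acc.1 ++ [PySem.Str.strip (PySem.Str.join " " acc.2)] else acc.1) ++ [""], [])
  else (acc.1, acc.2 ++ [PySem.Str.strip line])

-- A's final flush of a non-empty paragraph
def pvFinishA (st : List String × List String) : List String :=
  if st.2 ≠ [] then st.1 ++ [PySem.Str.strip (PySem.Str.join " " st.2)] else st.1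

def fold_block_py (style : String) (lines : List String) : String :=
  if style = "|" then pvRstripNl (PySem.Str.join "\n" lines)
  else if style = ">" then
    pvRstripNl (PySem.Str.join "\n" (pvFinishA (lines.foldl pvStepA ([], []))))
  else pvRstripNl (PySem.Str.join "\n" lines)

-- ===== PORT B =====
-- "line is non-blank" (the run predicate of B's inner while loop)
def pvNb (x : String) : Bool := PySem.Str.strip x != ""

def pvEntries (lines : List String) : List String :=
  match lines with
  | [] => []
  | l :: ls =>
    if PySem.Str.strip l = "" then "" :: pvEntries ls
    else
      PySem.Str.strip (PySem.Str.join " " ((l :: ls.takeWhile pvNb).map PySem.Str.strip))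
        :: pvEntries (ls.dropWhile pvNb)
termination_by lines.length
decreasing_by
  · simp
  · have := List.length_dropWhile_le pvNb ls; simp; omega

def fold_block_py_alt (style : String) (lines : List String) : String :=
  if style = ">" then pvRstripNl (PySem.Str.join "\n" (pvEntries lines))
  else pvRstripNl (PySem.Str.join "\n" lines)

-- ===== PRECONDITION & SPEC =====
def Spec_fold_block_py (style : String) (lines : List String) (out : String) : Prop := out = fold_block_py_alt style lines
instance (style : String) (lines : List String) (out : String) : Decidable (Spec_fold_block_py style lines out) := by unfold Spec_fold_block_py; infer_instance

-- ===== CLAIM (what is proved, stated in full; the proofs are below) =====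
def Claim_equal_fold_block_py : Prop := ∀ (style : String) (lines : List String), Dom_fold_block_py style lines → Spec_fold_block_py style lines (fold_block_py style lines)

-- ===== LEMMAS AND PROOFS =====

def pvFlush (p : List String) : List String :=
  if p ≠ [] then [PySem.Str.strip (PySem.Str.join " " p)] else []

-- the entries A will still emit, given the pending paragraph p and the remaining lines
def pvEntriesFrom (p : List String) (lines : List String) : List String :=
  match lines with
  | [] => pvFlush p
  | l :: ls =>
    if PySem.Str.strip l = "" then pvFlush p ++ "" :: pvEntriesFrom [] ls
    else pvEntriesFrom (p ++ [PySem.Str.strip l]) ls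

lemma pvFoldA (lines : List String) : ∀ (output p : List String),
    pvFinishA (lines.foldl pvStepA (output, p)) = output ++ pvEntriesFrom p lines := by
  induction lines with
  | nil =>
    intro output p
    simp [pvFinishA, pvEntriesFrom, pvFlush]
    split_ifs <;> simp
  | cons l ls ih =>
    intro output p
    simp only [List.foldl_cons, pvEntriesFrom, pvStepA]
    by_cases h : PySem.Str.strip l = ""
    · simp only [h, ih, pvFlush]
      split_ifs <;> simp
    · simp [h, ih]

lemma pvEntriesFrom_eq (lines : List String) : ∀ (p : List String),
    pvEntriesFrom p lines =
      if p = [] then pvEntries lines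
      else PySem.Str.strip (PySem.Str.join " " (p ++ (lines.takeWhile pvNb).map PySem.Str.strip))
             :: pvEntries (lines.dropWhile pvNb) := by
  induction lines with
  | nil =>
    intro p
    simp only [pvEntriesFrom, pvFlush]
    split_ifs <;> simp_all [pvEntries]
  | cons l ls ih =>
    intro p
    by_cases h : PySem.Str.strip l = ""
    · have hnb : pvNb l = false := by simp [pvNb, h]
      rw [pvEntriesFrom, pvEntries]
      simp only [h, ih]
      by_cases hp : p = []
      · simp [hp, pvFlush]
      · simp [hp, pvFlush, List.takeWhile, List.dropWhile, hnb, pvEntries, h]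
    · have hnb : pvNb l = true := by simp [pvNb, h]
      rw [pvEntriesFrom]
      simp only [h, ih]
      by_cases hp : p = []
      · subst hp
        rw [pvEntries]
        simp [h]
      · simp [hp, hnb]

-- ===== VERDICT (by name: the statement is the Claim_ definition above) =====
theorem fold_block_py_spec : Claim_equal_fold_block_py := by
  unfold Claim_equal_fold_block_py
  intro style lines _
  unfold Spec_fold_block_py fold_block_py fold_block_py_alt
  by_cases h1 : style = "|"
  · simp [h1]
  · by_cases h2 : style = ">"
    · have := pvFoldA lines [] []
      rw [pvEntriesFrom_eq] at this
      simp at this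
      simp [h2, this]
    · simp [h1, h2]
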